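-- pv_equiv track=rewrite | github.com/billpquach/pinlist-music-recommender | test_pinclip.py | deduplicate_by_artist
-- ===== SOURCE A (Python) =====
-- def deduplicate_by_artist(scored: list, max_per_artist: int = 2) -> list:
--     artist_count = {}
--     result = []
--     for entry in scored:
--         artist = entry[2]
--         if artist_count.get(artist, 0) < max_per_artist:
--             result.append(entry)
--             artist_count[artist] = artist_count.get(artist, 0) + 1
--     return result
-- ===== SOURCE B (Python) =====
-- def deduplicate_by_artist(scored: list, max_per_artist: int = 2) -> list:
--     # Stateless formulation: an entry is kept iff fewer than max_per_artist
--     # earlier entries share its artist.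
--     return [entry for i, entry in enumerate(scored)
--             if sum(1 for prev in scored[:i] if prev[2] == entry[2]) < max_per_artist]
-- ===== Notes on version B (the rewrite author's own statement) =====
-- stated objective: simpler
-- what changed: Replaces the running counter dict and accumulator list with a single stateless comprehension that keeps an entry iff fewer than max_per_artist earlier entries share its artist.
import Mathlib
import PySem

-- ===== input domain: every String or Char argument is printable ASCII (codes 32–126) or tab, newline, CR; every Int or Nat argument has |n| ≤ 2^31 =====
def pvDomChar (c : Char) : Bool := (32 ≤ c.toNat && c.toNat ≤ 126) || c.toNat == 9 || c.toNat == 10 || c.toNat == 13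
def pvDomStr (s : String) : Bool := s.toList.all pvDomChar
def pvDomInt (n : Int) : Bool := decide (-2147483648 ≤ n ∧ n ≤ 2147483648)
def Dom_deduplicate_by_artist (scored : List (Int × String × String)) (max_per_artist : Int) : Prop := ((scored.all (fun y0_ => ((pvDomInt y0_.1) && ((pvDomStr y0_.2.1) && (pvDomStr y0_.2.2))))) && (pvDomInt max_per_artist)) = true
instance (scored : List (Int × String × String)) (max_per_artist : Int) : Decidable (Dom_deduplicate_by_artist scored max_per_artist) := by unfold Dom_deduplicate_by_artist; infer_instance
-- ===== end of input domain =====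

-- B replaces A's running counter dict + accumulator with one stateless comprehension
-- keeping an entry iff fewer than max_per_artist earlier entries share its artist
-- (objective: simpler; not faster).

-- ===== PORT A =====
def deduplicate_by_artist (scored : List (Int × String × String)) (max_per_artist : Int) : List (Int × String × String) :=
  (scored.foldl
    (fun (st : PySem.Dict String Int × List (Int × String × String)) entry =>
      let artist := entry.2.2
      if st.1.getD artist 0 < max_per_artist then
        (st.1.insert artist (st.1.getD artist 0 + 1), st.2 ++ [entry])
      else st)
    (PySem.Dict.empty, [])).2

-- ===== PORT B =====
def deduplicate_by_artist_alt (scored : List (Int × String × String)) (max_per_artist : Int) : List (Int × String × String) :=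
  ((PySem.List.enumerate scored).filter
    (fun p =>
      decide ((((PySem.List.slice scored (some 0) (some p.1)).countP
          (fun prev => prev.2.2 == p.2.2.2) : Nat) : Int) < max_per_artist))).map (·.2)

-- ===== PRECONDITION & SPEC =====
def Spec_deduplicate_by_artist (scored : List (Int × String × String)) (max_per_artist : Int) (out : List (Int × String × String)) : Prop := out = deduplicate_by_artist_alt scored max_per_artist
instance (scored : List (Int × String × String)) (max_per_artist : Int) (out : List (Int × String × String)) : Decidable (Spec_deduplicate_by_artist scored max_per_artist out) := by unfold Spec_deduplicate_by_artist; infer_instance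

-- ===== CLAIM (what is proved, stated in full; the proofs are below) =====
def Claim_equal_deduplicate_by_artist : Prop := ∀ (scored : List (Int × String × String)) (max_per_artist : Int), Dom_deduplicate_by_artist scored max_per_artist → Spec_deduplicate_by_artist scored max_per_artist (deduplicate_by_artist scored max_per_artist)

-- ===== LEMMAS AND PROOFS =====

-- Reference recursion: keep an entry iff fewer than m earlier (prefix) entries share its artist.
def pvKeep (m : Int) : List (Int × String × String) → List (Int × String × String) → List (Int × String × String)
  | _, [] => []
  | pre, e :: t =>
    if ((pre.countP (fun p => p.2.2 == e.2.2) : Nat) : Int) < m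
    then e :: pvKeep m (pre ++ [e]) t
    else pvKeep m (pre ++ [e]) t

-- A's loop invariant: the counter stores min(prefix same-artist count, m) when 0 ≤ m, and stays 0 otherwise.
lemma pvA_aux (m : Int) (rest : List (Int × String × String)) :
    ∀ (pre : List (Int × String × String)) (d : PySem.Dict String Int)
      (acc : List (Int × String × String)),
      (∀ a : String, d.getD a 0 =
        if 0 ≤ m then min ((pre.countP (fun p => p.2.2 == a) : Nat) : Int) m else 0) →
      (rest.foldl
        (fun (st : PySem.Dict String Int × List (Int × String × String)) entry =>
          let artist := entry.2.2
          if st.1.getD artist 0 < m then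
            (st.1.insert artist (st.1.getD artist 0 + 1), st.2 ++ [entry])
          else st)
        (d, acc)).2 = acc ++ pvKeep m pre rest := by
  induction rest with
  | nil => intro pre d acc _; simp [pvKeep]
  | cons e t ih =>
    intro pre d acc hinv
    have h0 : (0 : Int) ≤ ((pre.countP (fun p => p.2.2 == e.2.2) : Nat) : Int) :=
      Int.natCast_nonneg _
    have hcond : (d.getD e.2.2 0 < m) ↔ (((pre.countP (fun p => p.2.2 == e.2.2) : Nat) : Int) < m) := by
      rw [hinv e.2.2]
      by_cases hm : 0 ≤ m
      · simp only [if_pos hm]; omega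
      · simp only [if_neg hm]; omega
    simp only [List.foldl_cons, pvKeep]
    by_cases hc : ((pre.countP (fun p => p.2.2 == e.2.2) : Nat) : Int) < m
    · have hm : 0 ≤ m := le_trans h0 (le_of_lt hc)
      rw [if_pos (hcond.mpr hc), if_pos hc]
      rw [ih (pre ++ [e]) _ _ ?_]
      · simp
      · intro a
        rw [PySem.Dict.getD_insert, hinv a, hinv e.2.2]
        by_cases ha : a = e.2.2
        · subst ha
          simp only [if_pos hm, List.countP_append, List.countP_cons, List.countP_nil,
            beq_self_eq_true]
          simp
          omega
        · rw [if_neg ha, if_pos hm, if_pos hm]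
          have hne : ((e.2.2 == a) : Bool) = false := by
            simp only [beq_eq_false_iff_ne, ne_eq]
            intro h; exact ha h.symm
          simp [List.countP_append, hne]
    · rw [if_neg (fun h => hc (hcond.mp h)), if_neg hc]
      apply ih
      intro a
      rw [hinv a]
      by_cases hm : 0 ≤ m
      · rw [if_pos hm, if_pos hm]
        by_cases ha : a = e.2.2
        · subst ha
          simp only [List.countP_append, List.countP_cons, List.countP_nil]
          simp
          omega
        · have hne : ((e.2.2 == a) : Bool) = false := by
            simp only [beq_eq_false_iff_ne, ne_eq]
            intro h; exact ha h.symm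
          simp [List.countP_append, hne]
      · rw [if_neg hm, if_neg hm]

lemma pvA_eq (scored : List (Int × String × String)) (m : Int) :
    deduplicate_by_artist scored m = pvKeep m [] scored := by
  unfold deduplicate_by_artist
  rw [pvA_aux m scored [] PySem.Dict.empty [] ?_]
  · simp
  · intro a
    by_cases hm : 0 ≤ m
    · simp [PySem.Dict.getD_empty, if_pos hm]
      omega
    · simp [PySem.Dict.getD_empty, if_neg hm]

-- B's comprehension over enumerate equals the same recursion: the slice scored[:i] is the processed prefix.
lemma pvB_aux (m : Int) (full : List (Int × String × String)) (rest : List (Int × String × String)) :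
    ∀ (pre : List (Int × String × String)), full = pre ++ rest →
      ((PySem.List.enumerate rest (pre.length : Int)).filter
        (fun p =>
          decide ((((PySem.List.slice full (some 0) (some p.1)).countP
              (fun prev => prev.2.2 == p.2.2.2) : Nat) : Int) < m))).map (·.2)
      = pvKeep m pre rest := by
  induction rest with
  | nil => intro pre _; simp [PySem.List.enumerate_nil, pvKeep]
  | cons e t ih =>
    intro pre hfull
    rw [PySem.List.enumerate_cons]
    have hpre : PySem.List.slice full (some 0) (some (pre.length : Int)) = pre := by
      rw [PySem.List.slice_zero_start, PySem.List.slice_to_natCast, hfull]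
      simp
    have hlen : (pre.length : Int) + 1 = ((pre ++ [e]).length : Int) := by simp
    simp only [List.filter_cons, hpre]
    by_cases hc : ((pre.countP (fun p => p.2.2 == e.2.2) : Nat) : Int) < m
    · rw [if_pos (by simpa using hc), List.map_cons, hlen, ih (pre ++ [e]) (by simp [hfull])]
      simp [pvKeep, hc]
    · rw [if_neg (by simpa using hc), hlen, ih (pre ++ [e]) (by simp [hfull])]
      simp [pvKeep, hc]

lemma pvB_eq (scored : List (Int × String × String)) (m : Int) :
    deduplicate_by_artist_alt scored m = pvKeep m [] scored := by
  unfold deduplicate_by_artist_alt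
  have := pvB_aux m scored scored [] (by simp)
  simpa using this

-- ===== VERDICT (by name: the statement is the Claim_ definition above) =====
theorem deduplicate_by_artist_spec : Claim_equal_deduplicate_by_artist := by
  intro scored m _
  unfold Spec_deduplicate_by_artist
  rw [pvA_eq, pvB_eq]
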